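-- pv_equiv track=rewrite | github.com/CastingSpell/toyLM | script.py | co_table
-- ===== SOURCE A (Python) =====
-- def co_table(oc_list):
--     table = dict()
--     for i in oc_list:
--         if i[0] in table:
--             if i[1] in table[i[0]]:
--                 table[i[0]][i[1]] += 1
--             else:
--                 table[i[0]][i[1]] = 1
--         else:
--             table[i[0]] = {}
--             table[i[0]][i[1]] = 1
--     return table
-- ===== SOURCE B (Python) =====
-- def co_table(oc_list):
--     counts = {}
--     for i in oc_list:
--         k = (i[0], i[1])
--         counts[k] = counts.get(k, 0) + 1
--     table = {}
--     for (a, b), c in counts.items():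
--         table.setdefault(a, {})[b] = c
--     return table
-- ===== Notes on version B (the rewrite author's own statement) =====
-- stated objective: alternative
-- what changed: B first aggregates all co-occurrences into one flat dict keyed by the pair tuple (a Counter) and then reshapes that flat table into the nested dict in a second pass, instead of growing the nested structure incrementally with membership branches.
import Mathlib
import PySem

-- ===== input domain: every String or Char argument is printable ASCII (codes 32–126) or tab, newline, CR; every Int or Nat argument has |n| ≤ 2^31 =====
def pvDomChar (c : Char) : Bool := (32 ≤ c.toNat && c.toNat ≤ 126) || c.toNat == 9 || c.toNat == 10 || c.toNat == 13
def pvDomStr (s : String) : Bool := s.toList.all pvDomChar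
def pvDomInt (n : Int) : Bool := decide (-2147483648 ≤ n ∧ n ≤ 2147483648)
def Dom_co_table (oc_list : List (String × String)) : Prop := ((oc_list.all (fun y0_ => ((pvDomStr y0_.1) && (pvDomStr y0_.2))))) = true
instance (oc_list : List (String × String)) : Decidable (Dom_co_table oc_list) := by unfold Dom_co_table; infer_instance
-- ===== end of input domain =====

-- B builds a flat pair-keyed counter first and reshapes it into the nested table in a
-- second pass (alternative decomposition; same asymptotic cost as A).


-- ===== PORT A =====
-- one iteration of A's loop body: the four membership branches, in A's order
def coStep (t : PySem.Dict String (PySem.Dict String Int)) (i : String × String) :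
    PySem.Dict String (PySem.Dict String Int) :=
  if t.contains i.1 then
    if (t.getD i.1 PySem.Dict.empty).contains i.2 then
      t.insert i.1 ((t.getD i.1 PySem.Dict.empty).insert i.2
        ((t.getD i.1 PySem.Dict.empty).getD i.2 0 + 1))
    else
      t.insert i.1 ((t.getD i.1 PySem.Dict.empty).insert i.2 1)
  else
    t.insert i.1 (PySem.Dict.empty.insert i.2 1)

def co_table (oc_list : List (String × String)) : List (String × List (String × Int)) :=
  ((oc_list.foldl coStep PySem.Dict.empty).items).map (fun q => (q.1, q.2.items))

-- ===== PORT B =====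
-- second pass: 'table.setdefault(a, {})[b] = c' as a persistent update (insert keeps
-- the position of an existing key, appends a fresh one — exactly setdefault + assign)
def bStep (t : PySem.Dict String (PySem.Dict String Int)) (q : (String × String) × Int) :
    PySem.Dict String (PySem.Dict String Int) :=
  t.insert q.1.1 ((t.getD q.1.1 PySem.Dict.empty).insert q.1.2 q.2)

def co_table_alt (oc_list : List (String × String)) : List (String × List (String × Int)) :=
  -- first pass: counts[(a,b)] = counts.get((a,b), 0) + 1
  let counts : PySem.Dict (String × String) Int :=
    oc_list.foldl (fun d i => d.insert (i.1, i.2) (d.getD (i.1, i.2) 0 + 1)) PySem.Dict.empty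
  let table : PySem.Dict String (PySem.Dict String Int) :=
    counts.items.foldl bStep PySem.Dict.empty
  table.items.map (fun q => (q.1, q.2.items))

-- ===== PRECONDITION & SPEC =====
def Spec_co_table (oc_list : List (String × String)) (out : List (String × List (String × Int))) : Prop := out = co_table_alt oc_list
instance (oc_list : List (String × String)) (out : List (String × List (String × Int))) : Decidable (Spec_co_table oc_list out) := by unfold Spec_co_table; infer_instance

-- ===== CLAIM (what is proved, stated in full; the proofs are below) =====
def Claim_equal_co_table : Prop := ∀ (oc_list : List (String × String)), Dom_co_table oc_list → Spec_co_table oc_list (co_table oc_list)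

-- ===== LEMMAS AND PROOFS =====
-- grouped characterisation of the nested table
def secondsOf (l : List (String × String)) (a : String) : List String :=
  (l.filter (fun p => p.1 == a)).map Prod.snd

def innerOf (l : List (String × String)) (a : String) : List (String × Int) :=
  (PySem.Set.ofList (secondsOf l a)).map (fun b => (b, (l.count (a, b) : Int)))

def groupOf (l : List (String × String)) : PySem.Dict String (PySem.Dict String Int) :=
  PySem.Dict.mk ((PySem.Set.ofList (l.map Prod.fst)).map (fun a => (a, PySem.Dict.mk (innerOf l a))))

-- grouped characterisation of B's reshape of a flat pair table
def gInner (ps : List ((String × String) × Int)) (a : String) : List (String × Int) :=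
  (ps.filter (fun q => q.1.1 == a)).map (fun q => (q.1.2, q.2))

def groupP (ps : List ((String × String) × Int)) : PySem.Dict String (PySem.Dict String Int) :=
  PySem.Dict.mk ((PySem.Set.ofList (ps.map (fun q => q.1.1))).map (fun a => (a, PySem.Dict.mk (gInner ps a))))

-- general Set.ofList commutation lemmas
lemma ofList_map_ofList {α β : Type} [BEq α] [LawfulBEq α] [BEq β] [LawfulBEq β]
    (l : List α) (f : α → β) :
    PySem.Set.ofList ((PySem.Set.ofList l).map f) = PySem.Set.ofList (l.map f) := by
  induction l using List.reverseRecOn with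
  | nil => rfl
  | append_singleton l x ih =>
    have hmap : (l ++ [x]).map f = l.map f ++ [f x] := by simp
    rw [hmap, PySem.Set.ofList_append_singleton, PySem.Set.ofList_append_singleton,
      PySem.Set.add_eq_ite]
    by_cases hx : x ∈ PySem.Set.ofList l
    · have hfx : f x ∈ PySem.Set.ofList (l.map f) :=
        (PySem.Set.mem_ofList _ _).mpr (List.mem_map_of_mem ((PySem.Set.mem_ofList _ _).mp hx))
      rw [if_pos hx, ih, PySem.Set.add_of_mem hfx]
    · have hmap2 : (PySem.Set.ofList l ++ [x]).map f = (PySem.Set.ofList l).map f ++ [f x] := by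
        simp
      rw [if_neg hx, hmap2, PySem.Set.ofList_append_singleton, ih]

lemma ofList_filter {α : Type} [BEq α] [LawfulBEq α] (l : List α) (p : α → Bool) :
    PySem.Set.ofList (l.filter p) = (PySem.Set.ofList l).filter p := by
  induction l using List.reverseRecOn with
  | nil => rfl
  | append_singleton l x ih =>
    rw [List.filter_append, PySem.Set.ofList_append_singleton, PySem.Set.add_eq_ite]
    by_cases hp : p x = true
    · have hfil : [x].filter p = [x] := by simp [hp]
      rw [hfil, PySem.Set.ofList_append_singleton, ih]
      by_cases hx : x ∈ PySem.Set.ofList l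
      · have hxf : x ∈ List.filter p (PySem.Set.ofList l) :=
          List.mem_filter.mpr ⟨hx, hp⟩
        rw [PySem.Set.add_of_mem hxf, if_pos hx]
      · have hxf : x ∉ List.filter p (PySem.Set.ofList l) := fun hm =>
          hx (List.mem_filter.mp hm).1
        rw [PySem.Set.add_of_not_mem hxf, if_neg hx, List.filter_append, hfil]
    · have hp' : p x = false := by simpa using hp
      have hfil : [x].filter p = [] := by simp [hp']
      rw [hfil, List.append_nil, ih]
      by_cases hx : x ∈ PySem.Set.ofList l
      · rw [if_pos hx]
      · rw [if_neg hx, List.filter_append, hfil, List.append_nil]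

lemma ofList_map_injOn {α β : Type} [BEq α] [LawfulBEq α] [BEq β] [LawfulBEq β]
    (l : List α) (f : α → β) (hinj : ∀ x ∈ l, ∀ y ∈ l, f x = f y → x = y) :
    PySem.Set.ofList (l.map f) = (PySem.Set.ofList l).map f := by
  induction l using List.reverseRecOn with
  | nil => rfl
  | append_singleton l x ih =>
    have hinj' : ∀ y ∈ l, ∀ z ∈ l, f y = f z → y = z := fun y hy z hz =>
      hinj y (List.mem_append_left _ hy) z (List.mem_append_left _ hz)
    have hmap : (l ++ [x]).map f = l.map f ++ [f x] := by simp
    rw [hmap, PySem.Set.ofList_append_singleton, ih hinj',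
      PySem.Set.ofList_append_singleton, PySem.Set.add_eq_ite, PySem.Set.add_eq_ite]
    by_cases hx : x ∈ PySem.Set.ofList l
    · have hfx : f x ∈ (PySem.Set.ofList l).map f := List.mem_map_of_mem hx
      rw [if_pos hfx, if_pos hx]
    · have hfx : f x ∉ (PySem.Set.ofList l).map f := by
        intro hm
        obtain ⟨y, hy, hfy⟩ := List.mem_map.mp hm
        have : y = x := hinj y (List.mem_append_left _ ((PySem.Set.mem_ofList _ _).mp hy)) x
          (List.mem_append_right _ (List.mem_singleton.mpr rfl)) hfy
        exact hx (this ▸ hy)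
      rw [if_neg hfx, if_neg hx]
      simp

-- lookups in a grouped dict
lemma keys_groupOf (l : List (String × String)) :
    (groupOf l).keys = PySem.Set.ofList (l.map Prod.fst) := by
  simp [groupOf, PySem.Dict.keys_mk, List.map_map, Function.comp_def]

lemma contains_groupOf (l : List (String × String)) (a : String) :
    (groupOf l).contains a = decide (a ∈ l.map Prod.fst) := by
  simp only [groupOf, PySem.Dict.contains_mk, List.any_map, Function.comp_def]
  rw [List.any_beq']
  simp [PySem.Set.mem_ofList]

lemma getD_groupOf (l : List (String × String)) (a : String) (ha : a ∈ l.map Prod.fst) :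
    (groupOf l).getD a PySem.Dict.empty = PySem.Dict.mk (innerOf l a) := by
  apply PySem.Dict.getD_of_mem_items
  · show (a, PySem.Dict.mk (innerOf l a)) ∈
      ((PySem.Set.ofList (l.map Prod.fst)).map (fun a => (a, PySem.Dict.mk (innerOf l a))))
    exact List.mem_map_of_mem ((PySem.Set.mem_ofList _ _).mpr ha)
  · rw [keys_groupOf]
    exact PySem.Set.nodup_ofList _

lemma keys_innerOf (l : List (String × String)) (a : String) :
    (PySem.Dict.mk (innerOf l a)).keys = PySem.Set.ofList (secondsOf l a) := by
  simp [innerOf, PySem.Dict.keys_mk, List.map_map, Function.comp_def]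

lemma contains_innerOf (l : List (String × String)) (a b : String) :
    (PySem.Dict.mk (innerOf l a)).contains b = decide (b ∈ secondsOf l a) := by
  simp only [innerOf, PySem.Dict.contains_mk, List.any_map, Function.comp_def]
  rw [List.any_beq']
  simp [PySem.Set.mem_ofList]

lemma getD_innerOf (l : List (String × String)) (a b : String) (hb : b ∈ secondsOf l a) :
    (PySem.Dict.mk (innerOf l a)).getD b 0 = (l.count (a, b) : Int) := by
  apply PySem.Dict.getD_of_mem_items
  · show (b, (l.count (a, b) : Int)) ∈ innerOf l a
    exact List.mem_map_of_mem ((PySem.Set.mem_ofList _ _).mpr hb)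
  · rw [keys_innerOf]
    exact PySem.Set.nodup_ofList _

-- how one more pair changes the grouped view
lemma secondsOf_append_ne (l : List (String × String)) (p : String × String) (a : String)
    (h : a ≠ p.1) : secondsOf (l ++ [p]) a = secondsOf l a := by
  have hne : (p.1 == a) = false := by simp [Ne.symm h]
  simp [secondsOf, List.filter_append, hne]

lemma secondsOf_append_self' (l : List (String × String)) (p : String × String) (a : String)
    (h : a = p.1) : secondsOf (l ++ [p]) a = secondsOf l a ++ [p.2] := by
  subst h; simp [secondsOf, List.filter_append]

lemma secondsOf_eq_nil (l : List (String × String)) (a : String) (h : a ∉ l.map Prod.fst) :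
    secondsOf l a = [] := by
  simp only [secondsOf, List.map_eq_nil_iff, List.filter_eq_nil_iff]
  intro q hq hqa
  exact h ((beq_iff_eq.mp hqa) ▸ List.mem_map_of_mem (f := Prod.fst) hq)

lemma count_append_pair (l : List (String × String)) (p q : String × String) :
    (l ++ [p]).count q = l.count q + (if q = p then 1 else 0) := by
  rw [List.count_append, List.count_singleton]
  by_cases hqp : q = p
  · simp [hqp]
  · simp [hqp, Ne.symm hqp]

lemma innerOf_append_ne (l : List (String × String)) (p : String × String) (a : String)
    (h : a ≠ p.1) : innerOf (l ++ [p]) a = innerOf l a := by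
  unfold innerOf
  rw [secondsOf_append_ne l p a h]
  refine List.map_congr_left fun b _ => ?_
  rw [count_append_pair]
  simp [show (a, b) ≠ p from fun he => h (by rw [← he])]

lemma mem_secondsOf (l : List (String × String)) (a b : String) :
    b ∈ secondsOf l a ↔ (a, b) ∈ l := by
  simp only [secondsOf, List.mem_map, List.mem_filter, beq_iff_eq]
  constructor
  · rintro ⟨⟨x, y⟩, ⟨hm, hx⟩, hy⟩
    simp only at hx hy
    subst hx; subst hy; exact hm
  · intro h
    exact ⟨(a, b), ⟨h, rfl⟩, rfl⟩

-- A's loop step preserves the grouped characterisation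
lemma coStep_groupOf (l : List (String × String)) (p : String × String) :
    coStep (groupOf l) p = groupOf (l ++ [p]) := by
  apply PySem.Dict.ext
  by_cases hA : p.1 ∈ l.map Prod.fst
  · -- first key already present
    have hc : (groupOf l).contains p.1 = true := by
      rw [contains_groupOf]; simp [hA]
    have hg : (groupOf l).getD p.1 PySem.Dict.empty = PySem.Dict.mk (innerOf l p.1) :=
      getD_groupOf l p.1 hA
    have houter : PySem.Set.ofList ((l ++ [p]).map Prod.fst)
        = PySem.Set.ofList (l.map Prod.fst) := by
      have : (l ++ [p]).map Prod.fst = l.map Prod.fst ++ [p.1] := by simp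
      rw [this, PySem.Set.ofList_append_singleton,
        PySem.Set.add_of_mem ((PySem.Set.mem_ofList _ _).mpr hA)]
    by_cases hB : p.2 ∈ secondsOf l p.1
    · -- pair already counted: bump the count in place
      have hcb : (PySem.Dict.mk (innerOf l p.1)).contains p.2 = true := by
        rw [contains_innerOf]; simp [hB]
      have hgb := getD_innerOf l p.1 p.2 hB
      simp only [coStep, hc, hg, hcb, hgb, if_true]
      rw [PySem.Dict.items_insert_of_contains _ _ hc]
      show ((PySem.Set.ofList (l.map Prod.fst)).map
          (fun a => (a, PySem.Dict.mk (innerOf l a)))).map _ = _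
      rw [List.map_map]
      unfold groupOf
      rw [houter]
      refine List.map_congr_left fun a' ha' => ?_
      by_cases hap : a' = p.1
      · subst hap
        simp only [Function.comp_def, beq_self_eq_true, if_pos]
        congr 1
        apply PySem.Dict.ext
        rw [PySem.Dict.items_insert_of_contains _ _ hcb]
        show (innerOf l p.1).map _ = innerOf (l ++ [p]) p.1
        unfold innerOf
        rw [List.map_map, secondsOf_append_self' l p p.1 rfl,
          PySem.Set.ofList_append_singleton,
          PySem.Set.add_of_mem ((PySem.Set.mem_ofList _ _).mpr hB)]
        refine List.map_congr_left fun b hb => ?_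
        by_cases hbp : b = p.2
        · subst hbp
          simp only [Function.comp_def, beq_self_eq_true, if_pos]
          rw [count_append_pair]
          simp
        · have hne2 : (b == p.2) = false := by simp [hbp]
          simp only [Function.comp_def, hne2, Bool.false_eq_true, if_false]
          rw [count_append_pair]
          simp [show (p.1, b) ≠ p from fun he => hbp (by rw [← he])]
      · have hne : (a' == p.1) = false := by simp [hap]
        simp only [Function.comp_def, hne, Bool.false_eq_true, if_false]
        rw [innerOf_append_ne l p a' hap]
    · -- new second key under an existing first key: append to the inner dict
      have hcb : (PySem.Dict.mk (innerOf l p.1)).contains p.2 = false := by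
        rw [contains_innerOf]; simp [hB]
      simp only [coStep, hc, hg, hcb, Bool.false_eq_true, if_false, if_true]
      rw [PySem.Dict.items_insert_of_contains _ _ hc]
      show ((PySem.Set.ofList (l.map Prod.fst)).map
          (fun a => (a, PySem.Dict.mk (innerOf l a)))).map _ = _
      rw [List.map_map]
      unfold groupOf
      rw [houter]
      refine List.map_congr_left fun a' ha' => ?_
      by_cases hap : a' = p.1
      · subst hap
        simp only [Function.comp_def, beq_self_eq_true, if_pos]
        congr 1
        apply PySem.Dict.ext
        rw [PySem.Dict.items_insert_of_not_contains _ _ hcb]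
        show innerOf l p.1 ++ [(p.2, 1)] = innerOf (l ++ [p]) p.1
        unfold innerOf
        rw [secondsOf_append_self' l p p.1 rfl, PySem.Set.ofList_append_singleton,
          PySem.Set.add_of_not_mem (fun hm => hB ((PySem.Set.mem_ofList _ _).mp hm)),
          List.map_append]
        congr 1
        · refine List.map_congr_left fun b hb => ?_
          rw [count_append_pair]
          have hb' : b ∈ secondsOf l p.1 := (PySem.Set.mem_ofList _ _).mp hb
          have hbp : b ≠ p.2 := fun he => hB (he ▸ hb')
          simp [show (p.1, b) ≠ p from fun he => hbp (by rw [← he])]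
        · have hcnt : l.count (p.1, p.2) = 0 :=
            List.count_eq_zero.mpr (fun hm => hB ((mem_secondsOf l p.1 p.2).mpr hm))
          rw [List.map_cons, List.map_nil, count_append_pair, hcnt]
          simp
      · have hne : (a' == p.1) = false := by simp [hap]
        simp only [Function.comp_def, hne, Bool.false_eq_true, if_false]
        rw [innerOf_append_ne l p a' hap]
  · -- fresh first key: append a new singleton inner dict
    have hc : (groupOf l).contains p.1 = false := by
      rw [contains_groupOf]; simp [hA]
    simp only [coStep, hc, Bool.false_eq_true, if_false]
    rw [PySem.Dict.items_insert_of_not_contains _ _ hc]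
    unfold groupOf
    have : (l ++ [p]).map Prod.fst = l.map Prod.fst ++ [p.1] := by simp
    rw [this, PySem.Set.ofList_append_singleton,
      PySem.Set.add_of_not_mem (fun hm => hA ((PySem.Set.mem_ofList _ _).mp hm)),
      List.map_append]
    congr 1
    · refine List.map_congr_left fun a' ha' => ?_
      have hap : a' ≠ p.1 := fun he =>
        hA (he ▸ (PySem.Set.mem_ofList _ _).mp ha')
      rw [innerOf_append_ne l p a' hap]
    · show [(p.1, PySem.Dict.empty.insert p.2 1)] = [(p.1, PySem.Dict.mk (innerOf (l ++ [p]) p.1))]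
      congr 2
      have hsec : secondsOf (l ++ [p]) p.1 = [p.2] := by
        rw [secondsOf_append_self' l p p.1 rfl, secondsOf_eq_nil l p.1 hA]
        rfl
      have hcnt : l.count (p.1, p.2) = 0 :=
        List.count_eq_zero.mpr (fun hm => hA (List.mem_map_of_mem (f := Prod.fst) hm))
      apply PySem.Dict.ext
      show [(p.2, (1 : Int))] = innerOf (l ++ [p]) p.1
      unfold innerOf
      rw [hsec]
      show _ = [(p.2, ((l ++ [p]).count (p.1, p.2) : Int))]
      rw [count_append_pair, hcnt]
      simp

lemma foldA (l : List (String × String)) :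
    l.foldl coStep PySem.Dict.empty = groupOf l := by
  induction l using List.reverseRecOn with
  | nil => rfl
  | append_singleton l p ih => rw [List.foldl_append, List.foldl_cons, List.foldl_nil, ih, coStep_groupOf]

lemma keys_groupP (ps : List ((String × String) × Int)) :
    (groupP ps).keys = PySem.Set.ofList (ps.map (fun q => q.1.1)) := by
  simp [groupP, PySem.Dict.keys_mk, List.map_map, Function.comp_def]

lemma contains_groupP (ps : List ((String × String) × Int)) (a : String) :
    (groupP ps).contains a = decide (a ∈ ps.map (fun q => q.1.1)) := by
  simp only [groupP, PySem.Dict.contains_mk, List.any_map, Function.comp_def]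
  rw [List.any_beq']
  simp [PySem.Set.mem_ofList]

lemma getD_groupP (ps : List ((String × String) × Int)) (a : String)
    (ha : a ∈ ps.map (fun q => q.1.1)) :
    (groupP ps).getD a PySem.Dict.empty = PySem.Dict.mk (gInner ps a) := by
  apply PySem.Dict.getD_of_mem_items
  · show (a, PySem.Dict.mk (gInner ps a)) ∈
      ((PySem.Set.ofList (ps.map (fun q => q.1.1))).map (fun a => (a, PySem.Dict.mk (gInner ps a))))
    exact List.mem_map_of_mem ((PySem.Set.mem_ofList _ _).mpr ha)
  · rw [keys_groupP]
    exact PySem.Set.nodup_ofList _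

lemma gInner_append_ne (ps : List ((String × String) × Int)) (q : (String × String) × Int)
    (a : String) (h : a ≠ q.1.1) : gInner (ps ++ [q]) a = gInner ps a := by
  have hne : (q.1.1 == a) = false := by simp [Ne.symm h]
  simp [gInner, List.filter_append, hne]

lemma gInner_append_self (ps : List ((String × String) × Int)) (q : (String × String) × Int)
    (a : String) (h : a = q.1.1) :
    gInner (ps ++ [q]) a = gInner ps a ++ [(q.1.2, q.2)] := by
  subst h; simp [gInner, List.filter_append]

lemma gInner_eq_nil (ps : List ((String × String) × Int)) (a : String)
    (h : a ∉ ps.map (fun q => q.1.1)) : gInner ps a = [] := by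
  simp only [gInner, List.map_eq_nil_iff, List.filter_eq_nil_iff]
  intro r hr hra
  exact h ((beq_iff_eq.mp hra) ▸ List.mem_map_of_mem (f := fun q => q.1.1) hr)

lemma contains_gInner_false (ps : List ((String × String) × Int)) (a b : String)
    (h : (a, b) ∉ ps.map Prod.fst) :
    (PySem.Dict.mk (gInner ps a)).contains b = false := by
  rw [PySem.Dict.contains_mk]
  by_contra hcon
  have hany : (gInner ps a).any (fun r => r.1 == b) = true := by
    simpa using hcon
  obtain ⟨r, hr, hrb⟩ := List.any_eq_true.mp hany
  obtain ⟨x, hx, hxr⟩ := List.mem_map.mp hr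
  have hxmem := List.mem_filter.mp hx
  have hxa : x.1.1 = a := beq_iff_eq.mp hxmem.2
  have hxb : x.1.2 = b := by rw [← hxr] at hrb; exact beq_iff_eq.mp hrb
  have : x.1 = (a, b) := by rw [← hxa, ← hxb]
  exact h (this ▸ List.mem_map_of_mem (f := Prod.fst) hxmem.1)

-- B's reshape of a flat table with distinct pair keys is the grouped dict
lemma reshapeP (ps : List ((String × String) × Int)) (h : (ps.map Prod.fst).Nodup) :
    ps.foldl bStep PySem.Dict.empty = groupP ps := by
  induction ps using List.reverseRecOn with
  | nil => rfl
  | append_singleton ps q ih =>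
    have hmap : (ps ++ [q]).map Prod.fst = ps.map Prod.fst ++ [q.1] := by simp
    rw [hmap] at h
    have hnd : (ps.map Prod.fst).Nodup := (List.nodup_append.mp h).1
    have hq1 : q.1 ∉ ps.map Prod.fst := by
      have hdj := (List.nodup_append.mp h).2.2
      intro hm
      exact absurd rfl (hdj q.1 hm q.1 (List.mem_singleton.mpr rfl))
    rw [List.foldl_append, List.foldl_cons, List.foldl_nil, ih hnd]
    apply PySem.Dict.ext
    by_cases ha : q.1.1 ∈ ps.map (fun r => r.1.1)
    · have hc : (groupP ps).contains q.1.1 = true := by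
        rw [contains_groupP]; simp [ha]
      have hg : (groupP ps).getD q.1.1 PySem.Dict.empty = PySem.Dict.mk (gInner ps q.1.1) :=
        getD_groupP ps q.1.1 ha
      have hcb : (PySem.Dict.mk (gInner ps q.1.1)).contains q.1.2 = false :=
        contains_gInner_false ps q.1.1 q.1.2 (by simpa using hq1)
      have houter : PySem.Set.ofList ((ps ++ [q]).map (fun r => r.1.1))
          = PySem.Set.ofList (ps.map (fun r => r.1.1)) := by
        have h2 : (ps ++ [q]).map (fun r => r.1.1) = ps.map (fun r => r.1.1) ++ [q.1.1] := by simp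
        rw [h2, PySem.Set.ofList_append_singleton,
          PySem.Set.add_of_mem ((PySem.Set.mem_ofList _ _).mpr ha)]
      simp only [bStep, hg]
      rw [PySem.Dict.items_insert_of_contains _ _ hc]
      show ((PySem.Set.ofList (ps.map (fun r => r.1.1))).map
          (fun a => (a, PySem.Dict.mk (gInner ps a)))).map _ = _
      rw [List.map_map]
      unfold groupP
      rw [houter]
      refine List.map_congr_left fun a' ha' => ?_
      by_cases hap : a' = q.1.1
      · subst hap
        simp only [Function.comp_def, beq_self_eq_true, if_pos]
        congr 1
        apply PySem.Dict.ext
        rw [PySem.Dict.items_insert_of_not_contains _ _ hcb]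
        show gInner ps q.1.1 ++ [(q.1.2, q.2)] = gInner (ps ++ [q]) q.1.1
        rw [gInner_append_self ps q q.1.1 rfl]
      · have hne : (a' == q.1.1) = false := by simp [hap]
        simp only [Function.comp_def, hne, Bool.false_eq_true, if_false]
        rw [gInner_append_ne ps q a' hap]
    · have hc : (groupP ps).contains q.1.1 = false := by
        rw [contains_groupP]; simp [ha]
      have hg : (groupP ps).getD q.1.1 PySem.Dict.empty = PySem.Dict.empty := by
        apply PySem.Dict.getD_of_not_contains
        exact hc
      simp only [bStep, hg]
      rw [PySem.Dict.items_insert_of_not_contains _ _ hc]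
      unfold groupP
      have h2 : (ps ++ [q]).map (fun r => r.1.1) = ps.map (fun r => r.1.1) ++ [q.1.1] := by simp
      rw [h2, PySem.Set.ofList_append_singleton,
        PySem.Set.add_of_not_mem (fun hm => ha ((PySem.Set.mem_ofList _ _).mp hm)),
        List.map_append]
      congr 1
      · refine List.map_congr_left fun a' ha' => ?_
        have hap : a' ≠ q.1.1 := fun he => ha (he ▸ (PySem.Set.mem_ofList _ _).mp ha')
        rw [gInner_append_ne ps q a' hap]
      · show [(q.1.1, PySem.Dict.empty.insert q.1.2 q.2)] = _
        congr 2
        apply PySem.Dict.ext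
        show [(q.1.2, q.2)] = gInner (ps ++ [q]) q.1.1
        rw [gInner_append_self ps q q.1.1 rfl, gInner_eq_nil ps q.1.1 ha]
        rfl

lemma groupP_counter (l : List (String × String)) :
    groupP ((PySem.Set.ofList l).map (fun k => (k, (l.count k : Int)))) = groupOf l := by
  unfold groupP groupOf
  have houter : ((PySem.Set.ofList l).map (fun k => (k, (l.count k : Int)))).map (fun q => q.1.1)
      = (PySem.Set.ofList l).map Prod.fst := by
    rw [List.map_map]; rfl
  rw [houter, ofList_map_ofList]
  congr 1
  refine List.map_congr_left fun a ha => ?_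
  congr 1
  apply PySem.Dict.ext
  show gInner _ a = innerOf l a
  unfold gInner innerOf
  rw [List.filter_map, List.map_map]
  have hfil : (fun q => q.1.1 == a) ∘ (fun k : String × String => (k, (l.count k : Int)))
      = fun k : String × String => k.1 == a := rfl
  rw [hfil, ← ofList_filter]
  have hinj : ∀ x ∈ l.filter (fun k : String × String => k.1 == a),
      ∀ y ∈ l.filter (fun k : String × String => k.1 == a), x.2 = y.2 → x = y := by
    intro x hx y hy hxy
    have hx1 : x.1 = a := beq_iff_eq.mp (List.mem_filter.mp hx).2
    have hy1 : y.1 = a := beq_iff_eq.mp (List.mem_filter.mp hy).2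
    exact Prod.ext (hx1.trans hy1.symm) hxy
  show _ = (PySem.Set.ofList (secondsOf l a)).map _
  unfold secondsOf
  rw [ofList_map_injOn _ Prod.snd hinj, List.map_map]
  refine List.map_congr_left fun k hk => ?_
  have hk1 : k.1 = a :=
    beq_iff_eq.mp (List.mem_filter.mp ((PySem.Set.mem_ofList _ _).mp hk)).2
  show (k.2, (l.count k : Int)) = (k.2, (l.count (a, k.2) : Int))
  rw [show (a, k.2) = k from by rw [← hk1]]

lemma alt_eq_groupOf (l : List (String × String)) :
    co_table_alt l = ((groupOf l).items).map (fun q => (q.1, q.2.items)) := by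
  show ((((l.foldl (fun d i => d.insert (i.1, i.2) (d.getD (i.1, i.2) 0 + 1))
      PySem.Dict.empty)).items.foldl bStep PySem.Dict.empty).items).map _ = _
  have hmapid : l.map (fun i : String × String => (i.1, i.2)) = l := by
    simp
  have hcnt : l.foldl (fun d i => d.insert (i.1, i.2) (d.getD (i.1, i.2) 0 + 1))
      PySem.Dict.empty = PySem.Dict.counter l := by
    rw [← PySem.Dict.foldl_insert_getD_add_one_eq_counter, ← hmapid, List.foldl_map]
  rw [hcnt, PySem.Dict.items_counter]
  have hnd : (((PySem.Set.ofList l).map (fun k => (k, (l.count k : Int)))).map Prod.fst).Nodup := by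
    rw [List.map_map]
    show (List.map (fun k => k) (PySem.Set.ofList l)).Nodup
    rw [List.map_id']
    exact PySem.Set.nodup_ofList l
  rw [reshapeP _ hnd, groupP_counter]

-- ===== VERDICT (by name: the statement is the Claim_ definition above) =====
theorem co_table_spec : Claim_equal_co_table := by
  intro l _
  unfold Spec_co_table co_table
  rw [foldA, alt_eq_groupOf]
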